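-- pv_equiv track=rewrite | github.com/AngelicaDiazB14/CLASESP. | Portafolio2A.py | adyacentesImpares_aux
-- ===== SOURCE A (Python) =====
-- def adyacentesImpares_aux(num):
--     digito = num %10
--     suma = digito + (num//10)%10
--     if(num == 0):
--         return True
--     elif(esImpar(suma) == False):
--         return False
--     else:
--         if(esImpar(suma) == True):
--             return adyacentesImpares_aux(num // 100)  #  n//100 quita los últimos dos dígito del número
--
--         else:
--             return False
--
-- def esImpar(n):
--     if(isinstance(n,int) and n >= 0):
--         if((n %2) != 0):
--             return True
--         else:
--             return False
--     else:
--         return "Error el número debe ser entero positivo"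
-- ===== SOURCE B (Python) =====
-- def adyacentesImpares_aux(num):
--     if num < 0:
--         return False
--     chunks = []
--     while num > 0:
--         chunks.append(num % 100)
--         num //= 100
--     return all((p // 10 + p % 10) % 2 == 1 for p in chunks)
-- ===== Notes on version B (the rewrite author's own statement) =====
-- stated objective: alternative
-- what changed: Replaces the early-return tail recursion with its double esImpar test by a two-phase computation: first a loop collects the number's two-digit chunks (num % 100) into a list, then all() checks that every chunk's digit sum is odd; negatives are rejected up front instead of by the recursion bottoming out at -1.
import Mathlib
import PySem

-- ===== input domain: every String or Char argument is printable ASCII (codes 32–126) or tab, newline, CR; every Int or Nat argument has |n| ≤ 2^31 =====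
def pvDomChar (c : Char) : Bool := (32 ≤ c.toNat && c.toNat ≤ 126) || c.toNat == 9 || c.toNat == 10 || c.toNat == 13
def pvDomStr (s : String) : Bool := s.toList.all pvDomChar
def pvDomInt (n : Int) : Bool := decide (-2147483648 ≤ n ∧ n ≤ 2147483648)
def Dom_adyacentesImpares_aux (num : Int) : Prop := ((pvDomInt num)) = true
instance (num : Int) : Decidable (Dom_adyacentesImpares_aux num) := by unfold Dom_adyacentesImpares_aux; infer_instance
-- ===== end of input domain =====

-- B replaces the early-return tail recursion by a two-phase pass: collect the two-digit chunks into a list, then check all chunk digit sums are odd (objective: alternative).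

-- termination helper for port B's while loop (only reached with positive num)
theorem pvFd100_pos_natAbs_lt (num : Int) (h0 : 0 < num) :
    (PySem.Int.floordiv num 100).natAbs < num.natAbs := by
  have h1 : PySem.Int.floordiv num 100 < num :=
    (PySem.Int.floordiv_lt_iff_lt_mul (by norm_num)).mpr (lt_mul_of_one_lt_right h0 (by norm_num))
  have h2 : 0 ≤ PySem.Int.floordiv num 100 :=
    (PySem.Int.le_floordiv_iff_mul_le (by norm_num)).mpr (by simpa using h0.le)
  exact Int.natAbs_lt_natAbs_of_nonneg_of_lt h2 h1

-- termination helper for port A: num//100 shrinks |num| except at 0 and -1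
theorem pvFd100_natAbs_lt (num : Int) (h0 : num ≠ 0) (h1 : num ≠ -1) :
    (PySem.Int.floordiv num 100).natAbs < num.natAbs := by
  rcases lt_trichotomy num 0 with hneg | hz | hpos
  · have ha : num ≤ -1 := by linarith [Int.lt_iff_add_one_le.mp hneg]
    have hb : num < -1 := lt_of_le_of_ne ha h1
    have hc : num ≤ -2 := by linarith [Int.lt_iff_add_one_le.mp hb]
    have heq := PySem.Int.floordiv_mul_add_mod num 100
    have hm0 := PySem.Int.mod_nonneg num (b := 100) (by norm_num)
    have hm1 := PySem.Int.mod_lt num (b := 100) (by norm_num)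
    have hq0 : PySem.Int.floordiv num 100 < 0 := by
      by_contra hcon
      have : (0 : Int) ≤ PySem.Int.floordiv num 100 * 100 :=
        mul_nonneg (not_lt.mp hcon) (by norm_num)
      linarith
    have hgt : num < PySem.Int.floordiv num 100 := by
      have hmul : num * 100 < PySem.Int.floordiv num 100 * 100 := by linarith
      exact lt_of_mul_lt_mul_right hmul (by norm_num)
    have := Int.natAbs_lt_natAbs_of_nonneg_of_lt
      (a := -PySem.Int.floordiv num 100) (b := -num)
      (neg_nonneg.mpr hq0.le) (neg_lt_neg hgt)
    simpa [Int.natAbs_neg] using this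
  · exact absurd hz h0
  · exact pvFd100_pos_natAbs_lt num hpos

-- ===== PORT A =====
-- esImpar: returns True/False for a nonnegative int, else an error STRING; ported as Option Bool (none = the string)
def esImparA (n : Int) : Option Bool :=
  if 0 ≤ n then
    if PySem.Int.mod n 2 ≠ 0 then some true else some false
  else none

def adyacentesImpares_aux (num : Int) : Bool :=
  let digito := PySem.Int.mod num 10
  let suma := digito + PySem.Int.mod (PySem.Int.floordiv num 10) 10
  if num = 0 then true
  else if esImparA suma = some false then false
  else if esImparA suma = some true then adyacentesImpares_aux (PySem.Int.floordiv num 100)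
  else false
termination_by num.natAbs
decreasing_by
  rename_i h0 h1 _
  refine pvFd100_natAbs_lt num h0 ?_
  intro h; subst h; exact h1 (by decide)

-- ===== PORT B =====
-- the while loop collecting num % 100 chunks (loop body appends, num //= 100)
def pvChunks (num : Int) : List Int :=
  if h : 0 < num then PySem.Int.mod num 100 :: pvChunks (PySem.Int.floordiv num 100)
  else []
termination_by num.natAbs
decreasing_by exact pvFd100_pos_natAbs_lt num h

def adyacentesImpares_aux_alt (num : Int) : Bool :=
  if num < 0 then false
  else (pvChunks num).all
    (fun p => PySem.Int.mod (PySem.Int.floordiv p 10 + PySem.Int.mod p 10) 2 == 1)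

-- ===== PRECONDITION & SPEC =====
def Spec_adyacentesImpares_aux (num : Int) (out : Bool) : Prop := out = adyacentesImpares_aux_alt num
instance (num : Int) (out : Bool) : Decidable (Spec_adyacentesImpares_aux num out) := by unfold Spec_adyacentesImpares_aux; infer_instance

-- ===== CLAIM (what is proved, stated in full; the proofs are below) =====
def Claim_equal_adyacentesImpares_aux : Prop := ∀ (num : Int), Dom_adyacentesImpares_aux num → Spec_adyacentesImpares_aux num (adyacentesImpares_aux num)

-- ===== LEMMAS AND PROOFS =====
theorem esImparA_of_nonneg (s : Int) (h : 0 ≤ s) :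
    esImparA s = some (s % 2 == 1) := by
  have hm := PySem.Int.mod_eq_emod_of_pos (a := s) (b := 2) (by norm_num)
  rw [esImparA, if_pos h, hm]
  rcases (by omega : s % 2 = 0 ∨ s % 2 = 1) with hp | hp <;> simp [hp]

-- one unfolding of A for num ≠ 0
theorem pvA_step (num : Int) (h0 : num ≠ 0) :
    adyacentesImpares_aux num =
      (if (PySem.Int.mod num 10 + PySem.Int.mod (PySem.Int.floordiv num 10) 10) % 2 = 1
       then adyacentesImpares_aux (PySem.Int.floordiv num 100) else false) := by
  rw [adyacentesImpares_aux]
  have hm1 := PySem.Int.mod_nonneg num (b := 10) (by norm_num)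
  have hm2 := PySem.Int.mod_nonneg (PySem.Int.floordiv num 10) (b := 10) (by norm_num)
  set s := PySem.Int.mod num 10 + PySem.Int.mod (PySem.Int.floordiv num 10) 10 with hs
  rw [esImparA_of_nonneg s (by omega)]
  rcases (by omega : s % 2 = 0 ∨ s % 2 = 1) with hp | hp <;> simp [h0, hp]

theorem pvB_neg (num : Int) (h : num < 0) : adyacentesImpares_aux_alt num = false := by
  simp [adyacentesImpares_aux_alt, h]

theorem pvB_zero : adyacentesImpares_aux_alt 0 = true := by
  rw [adyacentesImpares_aux_alt, pvChunks]
  simp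

-- one unfolding of B for 0 < num
theorem pvB_step (num : Int) (h : 0 < num) :
    adyacentesImpares_aux_alt num =
      (((num % 100 / 10 + num % 100 % 10) % 2 == 1) && adyacentesImpares_aux_alt (num / 100)) := by
  have he100 : PySem.Int.floordiv num 100 = num / 100 :=
    PySem.Int.floordiv_eq_ediv_of_pos (by norm_num)
  have hm100 : PySem.Int.mod num 100 = num % 100 :=
    PySem.Int.mod_eq_emod_of_pos (by norm_num)
  have hcd : PySem.Int.floordiv (num % 100) 10 = (num % 100) / 10 :=
    PySem.Int.floordiv_eq_ediv_of_pos (by norm_num)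
  have hcm : PySem.Int.mod (num % 100) 10 = (num % 100) % 10 :=
    PySem.Int.mod_eq_emod_of_pos (by norm_num)
  have hm2 : PySem.Int.mod ((num % 100) / 10 + (num % 100) % 10) 2
      = ((num % 100) / 10 + (num % 100) % 10) % 2 :=
    PySem.Int.mod_eq_emod_of_pos (by norm_num)
  have hq : ¬ num / 100 < 0 := by omega
  rw [adyacentesImpares_aux_alt, adyacentesImpares_aux_alt,
      if_neg (by omega : ¬ num < 0), if_neg hq, pvChunks, dif_pos h]
  simp only [List.all_cons, he100, hm100, hcd, hcm, hm2]

theorem pv_key : ∀ (n : Nat) (num : Int), num.natAbs ≤ n →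
    adyacentesImpares_aux num = adyacentesImpares_aux_alt num := by
  intro n
  induction n with
  | zero =>
      intro num h
      have : num = 0 := by omega
      subst this
      rw [adyacentesImpares_aux]
      simp [pvB_zero]
  | succ n ih =>
      intro num h
      by_cases h0 : num = 0
      · subst h0
        rw [adyacentesImpares_aux]
        simp [pvB_zero]
      · have he10 : PySem.Int.floordiv num 10 = num / 10 :=
          PySem.Int.floordiv_eq_ediv_of_pos (by norm_num)
        have he100 : PySem.Int.floordiv num 100 = num / 100 :=
          PySem.Int.floordiv_eq_ediv_of_pos (by norm_num)
        have hm10 : PySem.Int.mod num 10 = num % 10 :=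
          PySem.Int.mod_eq_emod_of_pos (by norm_num)
        have hmq : PySem.Int.mod (num / 10) 10 = (num / 10) % 10 :=
          PySem.Int.mod_eq_emod_of_pos (by norm_num)
        rw [pvA_step num h0, he10, he100, hm10, hmq]
        set s := num % 10 + (num / 10) % 10 with hs
        by_cases hneg : num < 0
        · rw [pvB_neg num hneg]
          rcases (by omega : s % 2 = 0 ∨ s % 2 = 1) with hp | hp
          · simp [hp]
          · -- the pair sum of -1 is 18, even, so here num ≠ -1 and the recursion shrinks
            have h1 : num ≠ -1 := by
              intro hE; rw [hE] at hs; norm_num at hs; omega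
            have hlt := pvFd100_natAbs_lt num h0 h1
            rw [he100] at hlt
            have hrneg : num / 100 < 0 := by omega
            have hrec := ih (num / 100) (by omega)
            rw [hp]
            simp [hrec, pvB_neg _ hrneg]
        · have hpos : 0 < num := by omega
          rw [pvB_step num hpos]
          have hsum : num % 100 / 10 + num % 100 % 10 = s := by omega
          rw [hsum]
          have hlt := pvFd100_pos_natAbs_lt num hpos
          rw [he100] at hlt
          have hrec := ih (num / 100) (by omega)
          rcases (by omega : s % 2 = 0 ∨ s % 2 = 1) with hp | hp
          · simp [hp]
          · simp [hp, hrec]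

-- ===== VERDICT (by name: the statement is the Claim_ definition above) =====
theorem adyacentesImpares_aux_spec : Claim_equal_adyacentesImpares_aux := by
  intro num _
  unfold Spec_adyacentesImpares_aux
  exact pv_key num.natAbs num le_rfl
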